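-- pv_equiv track=rewrite | github.com/CodingTestStudy2/Daily_Morning_Coding_Test | 프로그래머스/lv3/이슬기/prg_억억단을 외우자.py | solution
-- ===== SOURCE A (Python) =====
-- def solution(e, starts):
--     answer = []
--     count_list = [1] * (e+1)
--
--     for i in range(1, int(e*0.5)+1):
--         for j in range(i*2, e+1, i):
--             count_list[j] += 1
--
--     dp = [0] * (e+1)
--     dp[e] = e
--
--     for i in reversed(range(1, e)): # 최댓값 구하기
--         if count_list[i] >= count_list[dp[i+1]]:
--             dp[i] = i
--         else:
--             dp[i] = dp[i+1]
--
--     for start in starts: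
--         answer.append(dp[start])
--
--     return answer
-- ===== SOURCE B (Python) =====
-- def solution(e, starts):
--     # identical harmonic divisor-count sieve
--     count_list = [1] * (e+1)
--     for i in range(1, int(e*0.5)+1):
--         for j in range(i*2, e+1, i):
--             count_list[j] += 1
--     # no right-to-left suffix dp: visit the cells by decreasing divisor count
--     # (sort stability keeps equal-count cells in increasing index order); each
--     # visited cell answers every still-unanswered start position up to itself
--     best = [0] * (e+1)
--     low = 0
--     for i in sorted(range(1, e+1), key=lambda t: -count_list[t]):
--         if low < i:
--             for j in range(low+1, i+1):
--                 best[j] = i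
--             low = i
--     return [best[start] for start in starts]
-- ===== Notes on version B (the rewrite author's own statement) =====
-- stated objective: alternative
-- what changed: B keeps the divisor-count sieve but replaces A's right-to-left suffix-argmax dp recurrence by sorting the cells by decreasing divisor count (stable, so ties keep the smaller index) and filling each still-unanswered prefix of start positions with the visited cell.
import Mathlib
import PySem

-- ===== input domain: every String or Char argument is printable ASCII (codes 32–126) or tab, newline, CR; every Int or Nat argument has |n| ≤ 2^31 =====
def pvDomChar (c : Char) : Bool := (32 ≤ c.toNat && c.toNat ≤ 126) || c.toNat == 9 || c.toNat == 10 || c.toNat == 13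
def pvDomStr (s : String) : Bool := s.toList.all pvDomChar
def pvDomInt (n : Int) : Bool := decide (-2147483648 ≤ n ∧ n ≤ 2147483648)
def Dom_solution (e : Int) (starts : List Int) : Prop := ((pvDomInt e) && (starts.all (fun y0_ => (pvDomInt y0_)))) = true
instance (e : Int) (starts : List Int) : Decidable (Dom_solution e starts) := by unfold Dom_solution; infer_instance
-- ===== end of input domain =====

-- B replaces A's right-to-left suffix-argmax dp table by sorting the cells by decreasing
-- divisor count (stable sort ⇒ ties keep the smaller index) and filling each still-unanswered
-- prefix of start positions with the visited cell (objective: alternative; not faster).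


-- ===== PORT A =====
-- Python lists used as fixed-size integer tables are ported as Array Int.
-- pvGetA/pvSetA are exact for the nonnegative in-range indices that occur under Pre_
-- (Python would raise IndexError out of range; Pre_ excludes those inputs);
-- pvGetPy is Python's t[start] indexing including negative-index wraparound,
-- exact for -len ≤ start < len (out-of-range starts are excluded by Pre_).
def pvGetA (a : Array Int) (i : Int) : Int := a.getD i.toNat 0
def pvSetA (a : Array Int) (i : Int) (v : Int) : Array Int := a.setIfInBounds i.toNat v
def pvGetPy (a : Array Int) (i : Int) : Int :=
  if i < 0 then a.getD (i + a.size).toNat 0 else a.getD i.toNat 0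

-- shared helper: the divisor-count sieve, identical code in Source A and Source B
-- ('int(e*0.5)' is exact truncating halving for |e| ≤ 2^31 → PySem.Int.truncdiv e 2)
def pvSieve (e : Int) : Array Int :=
  (PySem.List.pyRange 1 (PySem.Int.truncdiv e 2 + 1) 1).foldl
    (fun cl i => (PySem.List.pyRange (i*2) (e+1) i).foldl
      (fun cl2 j => pvSetA cl2 j (pvGetA cl2 j + 1)) cl)
    (Array.replicate (e+1).toNat 1)

def solution (e : Int) (starts : List Int) : List Int :=
  let count_list := pvSieve e
  -- dp[e] = e is in range under Pre_; reversed(range(1, e)) = range(e-1, 0, -1)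
  let dp0 := pvSetA (Array.replicate (e+1).toNat 0) e e
  let dp := (PySem.List.pyRange (e-1) 0 (-1)).foldl
    (fun dp i =>
      pvSetA dp i
        (if pvGetA count_list i ≥ pvGetA count_list (pvGetA dp (i+1))
         then i else pvGetA dp (i+1))) dp0
  starts.foldl (fun answer start => answer ++ [pvGetPy dp start]) []

-- ===== PORT B =====
-- Source B's sorted(range(1, e+1), key=lambda t: -count_list[t]) is a STABLE sort of a
-- duplicate-free strictly increasing list, hence equals a merge sort by the
-- lexicographic comparison (key, value) written out below — exact, no drift on ties.
def solution_alt (e : Int) (starts : List Int) : List Int :=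
  let count_list := pvSieve e
  let st := (List.mergeSort (PySem.List.pyRange 1 (e+1) 1)
      (fun a b => decide (-(pvGetA count_list a) < -(pvGetA count_list b) ∨
        (-(pvGetA count_list a) = -(pvGetA count_list b) ∧ a ≤ b)))).foldl
    (fun st i =>
      if st.2 < i then
        ((PySem.List.pyRange (st.2+1) (i+1) 1).foldl
          (fun b j => pvSetA b j i) st.1, i)
      else st)
    (Array.replicate (e+1).toNat 0, 0)
  starts.map (fun start => pvGetPy st.1 start)

-- ===== PRECONDITION & SPEC =====
-- Pre_ is exactly where the Python A returns normally: e ≥ 0 (else dp[e] = e is an IndexError on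
-- an empty/short table) and every start a valid Python index -(e+1) ≤ start ≤ e into the table.
def Pre_solution (e : Int) (starts : List Int) : Prop :=
  0 ≤ e ∧ ∀ s ∈ starts, -(e+1) ≤ s ∧ s ≤ e
instance (e : Int) (starts : List Int) : Decidable (Pre_solution e starts) := by
  unfold Pre_solution; infer_instance

def pvWitness_solution : Int × List Int := (6, [2, 5, 1])

def Spec_solution (e : Int) (starts : List Int) (out : List Int) : Prop := out = solution_alt e starts
instance (e : Int) (starts : List Int) (out : List Int) : Decidable (Spec_solution e starts out) := by unfold Spec_solution; infer_instance

-- ===== CLAIM (what is proved, stated in full; the proofs are below) =====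
def Claim_equal_solution : Prop := ∀ (e : Int) (starts : List Int), Dom_solution e starts → Pre_solution e starts → Spec_solution e starts (solution e starts)

-- ===== LEMMAS AND PROOFS =====

-- Python's sort key value for cell t, and the induced strict 'visited before' order:
-- smaller key first, ties by smaller index
def pvKey (cnt : Array Int) (t : Int) : Int := -(pvGetA cnt t)

def pvLexLt (cnt : Array Int) (a b : Int) : Prop :=
  pvKey cnt a < pvKey cnt b ∨ (pvKey cnt a = pvKey cnt b ∧ a < b)

-- array accessor facts
theorem pvSetA_size (a : Array Int) (i v : Int) : (pvSetA a i v).size = a.size := by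
  simp [pvSetA]

theorem pvGetA_setA_self (a : Array Int) (i v : Int) (h0 : 0 ≤ i) (h1 : i < (a.size : Int)) :
    pvGetA (pvSetA a i v) i = v := by
  simp only [pvGetA, pvSetA]
  rw [Array.getD_eq_getD_getElem?, Array.getElem?_setIfInBounds, if_pos rfl,
      if_pos (by omega)]
  rfl

theorem pvGetA_setA_ne (a : Array Int) (i j v : Int) (hi : 0 ≤ i) (hj : 0 ≤ j) (hne : j ≠ i) :
    pvGetA (pvSetA a i v) j = pvGetA a j := by
  simp only [pvGetA, pvSetA]
  rw [Array.getD_eq_getD_getElem?, Array.getD_eq_getD_getElem?,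
      Array.getElem?_setIfInBounds, if_neg (by omega)]

-- the value both programs store for start e-k: first index in [e-k, e] with maximal count
def pvBF (cnt : Array Int) (e : Int) : Nat → Int
  | 0 => e
  | k+1 =>
    if pvGetA cnt (e - (k+1 : Nat)) ≥ pvGetA cnt (pvBF cnt e k)
    then e - (k+1 : Nat) else pvBF cnt e k

theorem pvBF_unfold (cnt : Array Int) (e i : Int) (h1 : i < e) :
    pvBF cnt e (e - i).toNat =
      if pvGetA cnt i ≥ pvGetA cnt (pvBF cnt e (e - (i+1)).toNat)
      then i else pvBF cnt e (e - (i+1)).toNat := by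
  have hk : (e - i).toNat = (e - (i+1)).toNat + 1 := by omega
  rw [hk]
  have h2 : (e - ((((e - (i+1)).toNat : Nat) + 1 : Nat) : Int)) = i := by omega
  simp only [pvBF, h2]

-- pvBF is the pvLexLt-minimum of the suffix [e-k, e]
theorem pvBF_spec (cnt : Array Int) (e : Int) (k : Nat) :
    e - k ≤ pvBF cnt e k ∧ pvBF cnt e k ≤ e ∧
      ∀ m : Int, e - k ≤ m → m ≤ e → m ≠ pvBF cnt e k → pvLexLt cnt (pvBF cnt e k) m := by
  induction k with
  | zero =>
    refine ⟨by simp [pvBF], by simp [pvBF], ?_⟩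
    intro m h1 h2 h3
    exact absurd (by simp only [pvBF] at h3 ⊢; omega : m = pvBF cnt e 0) h3
  | succ k ih =>
    obtain ⟨ih1, ih2, ih3⟩ := ih
    simp only [pvBF, Nat.cast_add, Nat.cast_one]
    refine ⟨?_, ?_, ?_⟩
    · split_ifs <;> omega
    · split_ifs <;> omega
    · intro m h1 h2 h3
      unfold pvLexLt pvKey
      split_ifs at h3 ⊢ with hc
      · by_cases hm : m = pvBF cnt e k
        · subst hm; omega
        · have h4 := ih3 m (by omega) h2 hm
          unfold pvLexLt pvKey at h4
          omega
      · by_cases hm : m = e - ((k : Int) + 1)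
        · subst hm; omega
        · have h4 := ih3 m (by omega) h2 h3
          unfold pvLexLt pvKey at h4
          omega

-- a pvLexLt-minimum of [j, e] is unique, hence equals pvBF
theorem pvBF_eq_of_min (cnt : Array Int) (e j c : Int) (hj : j ≤ e) (hc1 : j ≤ c) (hc2 : c ≤ e)
    (hmin : ∀ m : Int, j ≤ m → m ≤ e → m ≠ c → pvLexLt cnt c m) :
    c = pvBF cnt e (e - j).toNat := by
  obtain ⟨hb1, hb2, hb3⟩ := pvBF_spec cnt e (e - j).toNat
  have hcast : e - ((e - j).toNat : Int) = j := by omega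
  rw [hcast] at hb1 hb3
  by_contra hne
  have h1 := hb3 c hc1 hc2 hne
  have h2 := hmin _ hb1 hb2 (by intro h; exact hne h.symm)
  unfold pvLexLt pvKey at h1 h2
  omega

-- the merge sort by the lexicographic comparator is pvLexLt-sorted
theorem pvMS_pairwise (cnt : Array Int) (e : Int) :
    (List.mergeSort (PySem.List.pyRange 1 (e+1) 1)
      (fun a b => decide (-(pvGetA cnt a) < -(pvGetA cnt b) ∨
        (-(pvGetA cnt a) = -(pvGetA cnt b) ∧ a ≤ b)))).Pairwise (pvLexLt cnt) := by
  have hpw := List.pairwise_mergeSort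
    (le := fun a b : Int => decide (-(pvGetA cnt a) < -(pvGetA cnt b) ∨
        (-(pvGetA cnt a) = -(pvGetA cnt b) ∧ a ≤ b)))
    (by intro a b c hab hbc
        simp only [decide_eq_true_eq] at hab hbc ⊢
        omega)
    (by intro a b
        simp only [Bool.or_eq_true, decide_eq_true_eq]
        omega)
    (PySem.List.pyRange 1 (e+1) 1)
  have hperm := List.mergeSort_perm (PySem.List.pyRange 1 (e+1) 1)
    (fun a b => decide (-(pvGetA cnt a) < -(pvGetA cnt b) ∨
        (-(pvGetA cnt a) = -(pvGetA cnt b) ∧ a ≤ b)))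
  have hnd : (List.mergeSort (PySem.List.pyRange 1 (e+1) 1)
      (fun a b => decide (-(pvGetA cnt a) < -(pvGetA cnt b) ∨
        (-(pvGetA cnt a) = -(pvGetA cnt b) ∧ a ≤ b)))).Nodup :=
    hperm.nodup_iff.mpr (PySem.List.nodup_pyRange_one 1 (e+1))
  have hcomb := List.pairwise_and_iff.mpr ⟨hpw, hnd⟩
  apply hcomb.imp
  intro a b hab
  obtain ⟨h1, h2⟩ := hab
  simp only [decide_eq_true_eq] at h1
  unfold pvLexLt pvKey
  omega

-- writing v into cells [lo, lo+n) of b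
theorem pvFillLen (v : Int) (l : List Int) (b : Array Int) :
    (l.foldl (fun bb j => pvSetA bb j v) b).size = b.size := by
  induction l generalizing b with
  | nil => rfl
  | cons x l ih => rw [List.foldl_cons, ih, pvSetA_size]

theorem pvFillGet (v : Int) (n : Nat) :
    ∀ (lo : Int) (b : Array Int) (m : Int), 0 ≤ lo → 0 ≤ m → lo + n ≤ (b.size : Int) →
    pvGetA ((PySem.List.pyRange lo (lo + n) 1).foldl
        (fun bb j => pvSetA bb j v) b) m =
      if lo ≤ m ∧ m < lo + n then v else pvGetA b m := by
  induction n with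
  | zero =>
    intro lo b m hlo hm hlen
    rw [Nat.cast_zero, add_zero, PySem.List.pyRange_one_eq_nil (le_refl lo), List.foldl_nil]
    rw [if_neg (by omega)]
  | succ n ih =>
    intro lo b m hlo hm hlen
    rw [PySem.List.pyRange_one_cons (by omega : lo < lo + ((n+1 : Nat) : Int)), List.foldl_cons]
    have h2 : lo + ((n+1 : Nat) : Int) = (lo + 1) + (n : Int) := by push_cast; ring
    rw [h2, ih (lo+1) _ m (by omega) hm (by rw [pvSetA_size]; omega)]
    by_cases hml : m = lo
    · subst hml
      rw [if_neg (by omega), if_pos (by omega)]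
      exact pvGetA_setA_self b m v hm (by omega)
    · rw [pvGetA_setA_ne b lo m v hlo hm hml]
      split_ifs <;> first | rfl | omega

-- the candidate loop of B fills every cell with the pvBF value
theorem pvFillLoop (cnt : Array Int) (e : Int) (he : 0 ≤ e) :
    ∀ (rem : List Int) (best : Array Int) (low : Int),
    rem.Pairwise (pvLexLt cnt) →
    (∀ x ∈ rem, 1 ≤ x ∧ x ≤ e) →
    (∀ m : Int, low < m → m ≤ e → m ∈ rem) →
    0 ≤ low → low ≤ e →
    best.size = (e+1).toNat →
    pvGetA best 0 = 0 →
    (∀ j : Int, 1 ≤ j → j ≤ low → pvGetA best j = pvBF cnt e (e - j).toNat) →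
    ((rem.foldl (fun st i =>
        if st.2 < i then
          ((PySem.List.pyRange (st.2+1) (i+1) 1).foldl
            (fun b j => pvSetA b j i) st.1, i)
        else st) (best, low)).1.size = (e+1).toNat ∧
     pvGetA (rem.foldl (fun st i =>
        if st.2 < i then
          ((PySem.List.pyRange (st.2+1) (i+1) 1).foldl
            (fun b j => pvSetA b j i) st.1, i)
        else st) (best, low)).1 0 = 0 ∧
     ∀ j : Int, 1 ≤ j → j ≤ e →
       pvGetA (rem.foldl (fun st i =>
          if st.2 < i then
            ((PySem.List.pyRange (st.2+1) (i+1) 1).foldl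
              (fun b j => pvSetA b j i) st.1, i)
          else st) (best, low)).1 j = pvBF cnt e (e - j).toNat) := by
  intro rem
  induction rem with
  | nil =>
    intro best low _ _ hmem _ hlow2 hlen h0 hfill
    have hle : e ≤ low := by
      by_cases h : e ≤ low
      · exact h
      · exact absurd (hmem e (by omega) (le_refl e)) (List.not_mem_nil)
    exact ⟨hlen, h0, fun j hj1 hj2 => hfill j hj1 (by omega)⟩
  | cons c rest ih =>
    intro best low hpw hmem1 hmem hlow1 hlow2 hlen h0 hfill
    rw [List.pairwise_cons] at hpw
    obtain ⟨hhead, hpw⟩ := hpw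
    obtain ⟨hc1, hc2⟩ := hmem1 c List.mem_cons_self
    rw [List.foldl_cons]
    by_cases hlc : low < c
    · rw [if_pos hlc]
      have hrange : c + 1 = (low + 1) + (((c - low).toNat : Nat) : Int) := by omega
      have hbfc : ∀ j : Int, low + 1 ≤ j → j ≤ c → c = pvBF cnt e (e - j).toNat := by
        intro j hj1 hj2
        apply pvBF_eq_of_min cnt e j c (by omega) hj2 hc2
        intro m hm1 hm2 hm3
        rcases List.mem_cons.mp (hmem m (by omega) hm2) with rfl | hmmem
        · exact absurd rfl hm3
        · exact hhead m hmmem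
      rw [hrange]
      have hmem' : ∀ m : Int, c < m → m ≤ e →
          m ∈ rest := by
        intro m hm1 hm2
        rcases List.mem_cons.mp (hmem m (by omega) hm2) with rfl | h6
        · exact absurd hm1 (lt_irrefl _)
        · exact h6
      have hlen' : ((PySem.List.pyRange (low+1) ((low+1) + (((c - low).toNat : Nat) : Int)) 1).foldl
          (fun b j => pvSetA b j c) best).size = (e+1).toNat := by
        rw [pvFillLen]; exact hlen
      have hzero' : pvGetA ((PySem.List.pyRange (low+1) ((low+1) + (((c - low).toNat : Nat) : Int)) 1).foldl
          (fun b j => pvSetA b j c) best) 0 = 0 := by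
        rw [pvFillGet c _ _ _ _ (by omega) (le_refl 0) (by rw [hlen]; omega)]
        rw [if_neg (by omega)]
        exact h0
      have hfill' : ∀ j : Int, 1 ≤ j → j ≤ c →
          pvGetA ((PySem.List.pyRange (low+1) ((low+1) + (((c - low).toNat : Nat) : Int)) 1).foldl
            (fun b j => pvSetA b j c) best) j = pvBF cnt e (e - j).toNat := by
        intro j hj1 hj2
        rw [pvFillGet c _ _ _ _ (by omega) (by omega) (by rw [hlen]; omega)]
        split_ifs with hin
        · exact hbfc j (by omega) (by omega)
        · exact hfill j hj1 (by omega)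
      exact ih _ _ hpw (fun x hx => hmem1 x (List.mem_cons_of_mem c hx)) hmem'
        (by omega) hc2 hlen' hzero' hfill'
    · rw [if_neg hlc]
      apply ih _ _ hpw (fun x hx => hmem1 x (List.mem_cons_of_mem c hx)) ?_ hlow1 hlow2 hlen h0 hfill
      intro m hm1 hm2
      rcases List.mem_cons.mp (hmem m hm1 hm2) with rfl | h
      · exact absurd hm1 hlc
      · exact h

-- setting a positive cell keeps entry 0 intact
theorem pvSet_keep0 (dp : Array Int) (i v : Int) (h2 : 0 < i)
    (h0 : pvGetA dp 0 = 0) :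
    pvGetA (pvSetA dp i v) 0 = 0 := by
  rw [pvGetA_setA_ne dp i 0 v (by omega) (le_refl 0) (by omega)]
  exact h0

-- A's dp loop fills every processed cell with the pvBF value
theorem pvDpLoop (cnt : Array Int) (e : Int) (he : 1 ≤ e) (n : Nat) (hn : (n : Int) ≤ e - 1)
    (dp : Array Int) (hlen : dp.size = (e+1).toNat)
    (h0 : pvGetA dp 0 = 0)
    (hdp : ∀ j : Int, (n : Int) + 1 ≤ j → j ≤ e →
      pvGetA dp j = pvBF cnt e (e - j).toNat) :
    ((PySem.List.pyRange (n : Int) 0 (-1)).foldl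
        (fun dp i =>
          pvSetA dp i
            (if pvGetA cnt i ≥ pvGetA cnt (pvGetA dp (i+1))
             then i else pvGetA dp (i+1))) dp).size = (e+1).toNat ∧
    pvGetA ((PySem.List.pyRange (n : Int) 0 (-1)).foldl
        (fun dp i =>
          pvSetA dp i
            (if pvGetA cnt i ≥ pvGetA cnt (pvGetA dp (i+1))
             then i else pvGetA dp (i+1))) dp) 0 = 0 ∧
    ∀ j : Int, 1 ≤ j → j ≤ e →
      pvGetA ((PySem.List.pyRange (n : Int) 0 (-1)).foldl
          (fun dp i =>
            pvSetA dp i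
              (if pvGetA cnt i ≥ pvGetA cnt (pvGetA dp (i+1))
               then i else pvGetA dp (i+1))) dp) j = pvBF cnt e (e - j).toNat := by
  induction n generalizing dp with
  | zero =>
    rw [Nat.cast_zero, PySem.List.pyRange_neg_one_eq_nil (le_refl 0), List.foldl_nil]
    exact ⟨hlen, h0, fun j hj1 hj2 => hdp j (by omega) hj2⟩
  | succ n ih =>
    rw [PySem.List.pyRange_neg_one_cons (show (0:Int) < ((n+1 : Nat) : Int) by omega),
        List.foldl_cons]
    have hcast : ((n+1 : Nat) : Int) - 1 = (n : Int) := by push_cast; ring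
    rw [hcast]
    apply ih (by omega)
    · rw [pvSetA_size]; exact hlen
    · exact pvSet_keep0 dp _ _ (by omega) h0
    · intro j hj1 hj2
      by_cases hj : j = ((n+1 : Nat) : Int)
      · subst hj
        rw [pvGetA_setA_self dp _ _ (by omega) (by omega)]
        have hd : pvGetA dp (((n+1 : Nat) : Int) + 1) =
            pvBF cnt e (e - (((n+1 : Nat) : Int) + 1)).toNat := by
          apply hdp _ (by omega) (by omega)
        rw [pvBF_unfold cnt e ((n+1 : Nat) : Int) (by omega), hd]
      · rw [pvGetA_setA_ne dp _ _ _ (by omega) (by omega) hj]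
        exact hdp _ (by omega) hj2

-- two tables of size e+1 with entry 0 zero and pvBF values elsewhere are equal
theorem pvListEq (e : Int) (he : 0 ≤ e) (LA LB : Array Int)
    (hA1 : LA.size = (e+1).toNat)
    (hA2 : pvGetA LA 0 = 0)
    (hA3 : ∀ j : Int, 1 ≤ j → j ≤ e → pvGetA LA j = pvBF (pvSieve e) e (e - j).toNat)
    (hB1 : LB.size = (e+1).toNat)
    (hB2 : pvGetA LB 0 = 0)
    (hB3 : ∀ j : Int, 1 ≤ j → j ≤ e → pvGetA LB j = pvBF (pvSieve e) e (e - j).toNat) :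
    LA = LB := by
  apply Array.ext (by rw [hA1, hB1])
  intro k hk1 hk2
  have hk : (k : Int) ≤ e := by rw [hA1] at hk1; omega
  have hg : pvGetA LA ((k : Nat) : Int) = pvGetA LB ((k : Nat) : Int) := by
    rcases Nat.eq_zero_or_pos k with rfl | hkpos
    · rw [Nat.cast_zero, hA2, hB2]
    · rw [hA3 (k : Int) (by omega) hk, hB3 (k : Int) (by omega) hk]
  simp only [pvGetA, Array.getD, Int.toNat_natCast] at hg
  rw [dif_pos hk1, dif_pos hk2] at hg
  exact hg

-- the two tables are equal
theorem pvTables (e : Int) (he : 0 ≤ e) :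
    ((PySem.List.pyRange (e-1) 0 (-1)).foldl
      (fun dp i =>
        pvSetA dp i
          (if pvGetA (pvSieve e) i ≥ pvGetA (pvSieve e) (pvGetA dp (i+1))
           then i else pvGetA dp (i+1)))
      (pvSetA (Array.replicate (e+1).toNat 0) e e))
    =
    ((List.mergeSort (PySem.List.pyRange 1 (e+1) 1)
        (fun a b => decide (-(pvGetA (pvSieve e) a) < -(pvGetA (pvSieve e) b) ∨
          (-(pvGetA (pvSieve e) a) = -(pvGetA (pvSieve e) b) ∧ a ≤ b)))).foldl
      (fun st i =>
        if st.2 < i then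
          ((PySem.List.pyRange (st.2+1) (i+1) 1).foldl
            (fun b j => pvSetA b j i) st.1, i)
        else st)
      (Array.replicate (e+1).toNat 0, 0)).1 := by
  have hrepl0 : pvGetA (Array.replicate (e+1).toNat (0:Int)) 0 = 0 := by
    simp [pvGetA, Array.getD]
  have hperm := List.mergeSort_perm (PySem.List.pyRange 1 (e+1) 1)
    (fun a b => decide (-(pvGetA (pvSieve e) a) < -(pvGetA (pvSieve e) b) ∨
      (-(pvGetA (pvSieve e) a) = -(pvGetA (pvSieve e) b) ∧ a ≤ b)))
  have hB := pvFillLoop (pvSieve e) e he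
    (List.mergeSort (PySem.List.pyRange 1 (e+1) 1)
      (fun a b => decide (-(pvGetA (pvSieve e) a) < -(pvGetA (pvSieve e) b) ∨
        (-(pvGetA (pvSieve e) a) = -(pvGetA (pvSieve e) b) ∧ a ≤ b))))
    (Array.replicate (e+1).toNat 0) 0
    (pvMS_pairwise (pvSieve e) e)
    (by intro x hx
        rw [hperm.mem_iff, PySem.List.mem_pyRange_one] at hx
        omega)
    (by intro m hm1 hm2
        rw [hperm.mem_iff, PySem.List.mem_pyRange_one]
        omega)
    (le_refl 0) he (by simp) hrepl0
    (fun j hj1 hj2 => absurd hj2 (by omega))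
  have hA : (((PySem.List.pyRange (e-1) 0 (-1)).foldl
      (fun dp i =>
        pvSetA dp i
          (if pvGetA (pvSieve e) i ≥ pvGetA (pvSieve e) (pvGetA dp (i+1))
           then i else pvGetA dp (i+1)))
      (pvSetA (Array.replicate (e+1).toNat 0) e e)).size = (e+1).toNat) ∧
      (pvGetA ((PySem.List.pyRange (e-1) 0 (-1)).foldl
      (fun dp i =>
        pvSetA dp i
          (if pvGetA (pvSieve e) i ≥ pvGetA (pvSieve e) (pvGetA dp (i+1))
           then i else pvGetA dp (i+1)))
      (pvSetA (Array.replicate (e+1).toNat 0) e e)) 0 = 0) ∧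
      ∀ j : Int, 1 ≤ j → j ≤ e →
        pvGetA ((PySem.List.pyRange (e-1) 0 (-1)).foldl
          (fun dp i =>
            pvSetA dp i
              (if pvGetA (pvSieve e) i ≥ pvGetA (pvSieve e) (pvGetA dp (i+1))
               then i else pvGetA dp (i+1)))
          (pvSetA (Array.replicate (e+1).toNat 0) e e)) j =
        pvBF (pvSieve e) e (e - j).toNat := by
    have hsetlen : (pvSetA (Array.replicate (e+1).toNat (0:Int)) e e).size = (e+1).toNat := by
      rw [pvSetA_size]; simp
    rcases eq_or_lt_of_le he with he0 | he1
    · rw [PySem.List.pyRange_neg_one_eq_nil (by omega), List.foldl_nil]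
      refine ⟨hsetlen, ?_, fun j hj1 hj2 => absurd hj2 (by omega)⟩
      -- e = 0: the write dp[e] = e stores 0 at cell 0
      rw [← he0]
      rw [pvGetA_setA_self _ _ _ (le_refl 0) (by simp)]
    · have hset0 : pvGetA (pvSetA (Array.replicate (e+1).toNat (0:Int)) e e) 0 = 0 := by
        rw [pvGetA_setA_ne _ _ _ _ (by omega) (le_refl 0) (by omega)]
        exact hrepl0
      have hsete : ∀ j : Int, e ≤ j → j ≤ e →
          pvGetA (pvSetA (Array.replicate (e+1).toNat (0:Int)) e e) j
            = pvBF (pvSieve e) e (e - j).toNat := by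
        intro j hj1 hj2
        have hje : j = e := by omega
        rw [hje]
        have h00 : (e - e).toNat = 0 := by omega
        rw [h00]
        rw [pvGetA_setA_self _ _ _ (by omega) (by simp only [Array.size_replicate]; omega)]
        rfl
      obtain ⟨n, hn⟩ : ∃ n : Nat, e - 1 = (n : Int) := ⟨(e-1).toNat, by omega⟩
      rw [hn]
      exact pvDpLoop (pvSieve e) e (by omega) n (by omega) _ hsetlen hset0
        (fun j hj1 hj2 => hsete j (by omega) hj2)
  exact pvListEq e he _ _ hA.1 hA.2.1 hA.2.2 hB.1 hB.2.1 hB.2.2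

theorem pvMain (e : Int) (starts : List Int) (he : 0 ≤ e) :
    solution e starts = solution_alt e starts := by
  simp only [solution, solution_alt]
  rw [PySem.List.foldl_append_singleton_eq_map]
  simp only [List.nil_append]
  rw [pvTables e he]

-- ===== VERDICT (by name: the statement is the Claim_ definition above) =====
theorem solution_spec : Claim_equal_solution := by
  intro e starts _hdom hpre
  unfold Spec_solution
  exact pvMain e starts hpre.1
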